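-- pv_equiv track=rewrite | github.com/Evhane373/AdventOfCode | 2024/Day1/D1P1.py | getSame
-- ===== SOURCE A (Python) =====
-- def getSame(list1, list2):
--     score = 0
--     for x in list1:
--         count = 0
--         for y in list2:
--             if(x == y):
--                 count += 1
--         score += x * count
--     return(score)
-- ===== SOURCE B (Python) =====
-- def getSame(list1, list2):
--     # Sort both lists (sorted(), so arguments are not mutated) and merge them
--     # run by run: on an equal value, measure the run length in each sorted list
--     # once, add value * c1 * c2, and jump both pointers past their runs.
--     a = sorted(list1)
--     b = sorted(list2)
--     score = 0
--     i = 0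
--     j = 0
--     while i < len(a) and j < len(b):
--         if a[i] < b[j]:
--             i += 1
--         elif b[j] < a[i]:
--             j += 1
--         else:
--             v = a[i]
--             i2 = i
--             while i2 < len(a) and a[i2] == v:
--                 i2 += 1
--             j2 = j
--             while j2 < len(b) and b[j2] == v:
--                 j2 += 1
--             score += v * (i2 - i) * (j2 - j)
--             i = i2
--             j = j2
--     return score
-- ===== Notes on version B (the rewrite author's own statement) =====
-- stated objective: faster
-- what changed: Replaces the nested quadratic scan with sort-then-merge: both lists are sorted and walked run by run with two pointers, adding value*c1*c2 per shared value, so no per-element scan of list2 remains.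
import Mathlib
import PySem

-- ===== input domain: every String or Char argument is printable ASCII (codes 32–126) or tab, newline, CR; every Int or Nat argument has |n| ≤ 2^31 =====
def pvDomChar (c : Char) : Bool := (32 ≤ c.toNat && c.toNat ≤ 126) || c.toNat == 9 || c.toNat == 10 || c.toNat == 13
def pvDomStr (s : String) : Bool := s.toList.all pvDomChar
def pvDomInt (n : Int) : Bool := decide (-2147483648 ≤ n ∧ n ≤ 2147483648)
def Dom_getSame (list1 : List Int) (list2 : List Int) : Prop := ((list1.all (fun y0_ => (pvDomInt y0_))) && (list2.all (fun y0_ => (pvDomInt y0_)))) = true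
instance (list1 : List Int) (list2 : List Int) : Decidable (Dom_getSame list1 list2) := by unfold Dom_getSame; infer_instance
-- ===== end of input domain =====

-- B sorts both lists and walks them with a merge pointer instead of A's nested scans (alternative algorithm, asymptotically faster).
-- ===== PORT A =====
def getSame (list1 : List Int) (list2 : List Int) : Int :=
  list1.foldl (fun score x =>
    score + x * (list2.foldl (fun count y => if x == y then count + 1 else count) 0)) 0

-- ===== PORT B =====
-- the merge loop of Source B: the pointers i and j are represented by the remaining
-- suffixes of the two sorted lists; the two run-measuring while loops are
-- takeWhile lengths and the pointer jumps past the runs are dropWhile.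
def goSame : List Int → List Int → Int
  | [], _ => 0
  | _ :: _, [] => 0
  | x :: xs, y :: ys =>
    if x < y then goSame xs (y :: ys)
    else if y < x then goSame (x :: xs) ys
    else
      x * (1 + ((xs.takeWhile (fun z => decide (z = x))).length : Int))
          * (1 + ((ys.takeWhile (fun z => decide (z = x))).length : Int))
        + goSame (xs.dropWhile (fun z => decide (z = x)))
                 (ys.dropWhile (fun z => decide (z = x)))
termination_by a b => a.length + b.length
decreasing_by
  · simp only [List.length_cons]; omega
  · simp only [List.length_cons]; omega
  · have h1 := List.length_dropWhile_le (fun z => decide (z = x)) xs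
    have h2 := List.length_dropWhile_le (fun z => decide (z = x)) ys
    simp only [List.length_cons]
    omega

def getSame_alt (list1 : List Int) (list2 : List Int) : Int :=
  goSame (PySem.List.sorted list1 (fun x => x) false) (PySem.List.sorted list2 (fun x => x) false)

-- ===== PRECONDITION & SPEC =====
def Spec_getSame (list1 : List Int) (list2 : List Int) (out : Int) : Prop := out = getSame_alt list1 list2
instance (list1 : List Int) (list2 : List Int) (out : Int) : Decidable (Spec_getSame list1 list2 out) := by unfold Spec_getSame; infer_instance

-- ===== CLAIM (what is proved, stated in full; the proofs are below) =====
def Claim_equal_getSame : Prop := ∀ (list1 : List Int) (list2 : List Int), Dom_getSame list1 list2 → Spec_getSame list1 list2 (getSame list1 list2)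

-- ===== LEMMAS AND PROOFS =====

-- A's inner loop counts occurrences of x in l
theorem pv_inner_count (x : Int) (l : List Int) (a : Int) :
    l.foldl (fun count y => if x == y then count + 1 else count) a = a + (l.count x : Int) := by
  induction l generalizing a with
  | nil => simp
  | cons h t ih =>
    simp only [List.foldl, List.count_cons, ih]
    by_cases hx : x = h
    · simp [hx]; ring
    · have : (h == x) = false := by simp [Ne.symm hx]
      simp [hx, this]

-- A's outer loop is the sum of x * count x list2
theorem pv_getSame_eq_sum (l1 l2 : List Int) :
    getSame l1 l2 = (l1.map (fun x => x * (l2.count x : Int))).sum := by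
  unfold getSame
  induction l1 with
  | nil => simp
  | cons h t ih =>
    simp only [List.foldl_cons, List.map_cons, List.sum_cons]
    rw [pv_inner_count]
    have step : ∀ (a : Int) (l : List Int),
        l.foldl (fun score x =>
          score + x * (l2.foldl (fun count y => if x == y then count + 1 else count) 0)) a
        = a + l.foldl (fun score x =>
          score + x * (l2.foldl (fun count y => if x == y then count + 1 else count) 0)) 0 := by
      intro a l
      induction l generalizing a with
      | nil => simp
      | cons h' t' ih' =>
        simp only [List.foldl_cons]
        rw [ih', ih' (0 + _)]
        ring
    rw [step, ih]
    ring

-- dropping the leading run of x does not change the count of any z ≠ x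
theorem pv_count_dropRun (x z : Int) (hz : z ≠ x) (l : List Int) :
    (l.dropWhile (fun w => decide (w = x))).count z = l.count z := by
  induction l with
  | nil => simp
  | cons h t ih =>
    by_cases hh : h = x
    · subst hh
      have hne : (h == z) = false := by simp [Ne.symm hz]
      simp [List.count_cons, hne, ih]
    · simp [hh]

-- x does not occur in a list whose elements are all > x
theorem pv_count_zero_of_lt (x : Int) (b : List Int) (h : ∀ y ∈ b, x < y) :
    b.count x = 0 :=
  List.count_eq_zero.mpr (fun hm => absurd (h x hm) (lt_irrefl x))

-- after dropping the leading run of x from a sorted list of elements ≥ x, everything is > x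
theorem pv_dropRun_gt (x : Int) (l : List Int)
    (hs : l.Pairwise (fun p q => p ≤ q)) (hge : ∀ y ∈ l, x ≤ y) :
    ∀ z ∈ l.dropWhile (fun w => decide (w = x)), x < z := by
  induction l with
  | nil => simp
  | cons h t ih =>
    rcases List.pairwise_cons.mp hs with ⟨hh, ht⟩
    by_cases hx : h = x
    · subst hx
      simpa [List.dropWhile_cons] using ih ht (fun y hy => hh y hy)
    · intro z hz
      rw [List.dropWhile_cons] at hz
      simp only [hx, decide_false, if_neg Bool.false_ne_true] at hz
      have hxh : x < h := lt_of_le_of_ne (hge h (by simp)) (Ne.symm hx)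
      rcases List.mem_cons.mp hz with h1 | h2
      · omega
      · exact lt_of_lt_of_le hxh (hh z h2)

-- in a sorted list whose elements are all ≥ x, the leading run of x is all of count x
theorem pv_run_count (x : Int) (b : List Int)
    (hs : b.Pairwise (fun p q => p ≤ q)) (hge : ∀ y ∈ b, x ≤ y) :
    (b.takeWhile (fun y => decide (y = x))).length = b.count x := by
  induction b with
  | nil => simp
  | cons h t ih =>
    rcases List.pairwise_cons.mp hs with ⟨hh, ht⟩
    by_cases hx : h = x
    · have hrec := ih ht (fun y hy => le_trans (hge h (by simp)) (hh y hy))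
      subst hx
      simp [hrec]
    · have hgt : x < h := lt_of_le_of_ne (hge h (by simp)) (Ne.symm hx)
      have hcz : (h :: t).count x = 0 := by
        rw [List.count_eq_zero]
        intro hmem
        rcases List.mem_cons.mp hmem with h1 | h2
        · omega
        · exact absurd (hh x h2) (by omega)
      have hxd : (decide (h = x)) = false := by simp [hx]
      simp [hxd, hcz]

-- summing f over a constant run of x
theorem pv_sum_run (x : Int) (f : Int → Int) (l : List Int) (h : ∀ z ∈ l, z = x) :
    (l.map f).sum = (l.length : Int) * f x := by
  induction l with
  | nil => simp
  | cons a t ih =>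
    have ha := h a (by simp)
    have := ih (fun z hz => h z (by simp [hz]))
    simp only [List.map_cons, List.sum_cons, List.length_cons, this, ha]
    push_cast
    ring

-- the run-by-run merge of two sorted lists computes the sum of x * count x b
theorem pv_goSame_eq_sum (a b : List Int)
    (ha : a.Pairwise (fun p q => p ≤ q)) (hb : b.Pairwise (fun p q => p ≤ q)) :
    goSame a b = (a.map (fun x => x * (b.count x : Int))).sum := by
  induction a, b using goSame.induct with
  | case1 b => simp [goSame]
  | case2 x xs => simp [goSame]
  | case3 x xs y ys hxy ih =>
    rcases List.pairwise_cons.mp ha with ⟨hx, hxs⟩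
    rcases List.pairwise_cons.mp hb with ⟨hy, hys⟩
    have hc0 : (y :: ys).count x = 0 := by
      apply pv_count_zero_of_lt
      intro z hz
      rcases List.mem_cons.mp hz with h | h
      · omega
      · exact lt_of_lt_of_le hxy (hy z h)
    rw [show goSame (x :: xs) (y :: ys) = goSame xs (y :: ys) from by rw [goSame]; simp [hxy]]
    rw [ih hxs hb]
    simp [hc0]
  | case4 x xs y ys h1 h2 ih =>
    rcases List.pairwise_cons.mp ha with ⟨hx, hxs⟩
    rcases List.pairwise_cons.mp hb with ⟨hy, hys⟩
    have hmap : ∀ z ∈ x :: xs, z * ((y :: ys).count z : Int) = z * (ys.count z : Int) := by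
      intro z hz
      have hxz : x ≤ z := by
        rcases List.mem_cons.mp hz with h | h
        · omega
        · exact hx z h
      have hne : (y == z) = false := by simp; omega
      rw [List.count_cons, hne]
      simp
    rw [show goSame (x :: xs) (y :: ys) = goSame (x :: xs) ys from by rw [goSame]; simp [h1, h2]]
    rw [ih ha hys, List.map_congr_left hmap]
  | case5 x xs y ys h1 h2 ih =>
    have hyx : x = y := by omega
    subst hyx
    rcases List.pairwise_cons.mp ha with ⟨hx, hxs⟩
    rcases List.pairwise_cons.mp hb with ⟨hy, hys⟩
    have hdx : (xs.dropWhile (fun z => decide (z = x))).Pairwise (fun p q => p ≤ q) :=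
      List.Pairwise.sublist (List.dropWhile_sublist _) hxs
    have hdy : (ys.dropWhile (fun z => decide (z = x))).Pairwise (fun p q => p ≤ q) :=
      List.Pairwise.sublist (List.dropWhile_sublist _) hys
    have hgt : ∀ z ∈ xs.dropWhile (fun w => decide (w = x)), x < z :=
      pv_dropRun_gt x xs hxs (fun w hw => hx w hw)
    have hrun : (ys.takeWhile (fun z => decide (z = x))).length = ys.count x :=
      pv_run_count x ys hys (fun w hw => hy w hw)
    have hrunx : ∀ z ∈ xs.takeWhile (fun w => decide (w = x)), z = x := by
      intro z hz
      have := List.mem_takeWhile_imp hz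
      simpa using this
    conv_rhs => rw [show xs = xs.takeWhile (fun w => decide (w = x)) ++ xs.dropWhile (fun w => decide (w = x)) from (List.takeWhile_append_dropWhile).symm]
    rw [List.map_cons, List.sum_cons, List.map_append, List.sum_append]
    rw [pv_sum_run x _ _ hrunx]
    have hdropmap : (xs.dropWhile (fun w => decide (w = x))).map (fun z => z * (((x :: ys).count z : Int)))
        = (xs.dropWhile (fun w => decide (w = x))).map (fun z => z * (((ys.dropWhile (fun w => decide (w = x))).count z : Int))) := by
      apply List.map_congr_left
      intro z hz
      have hzx : x < z := hgt z hz
      have hne : (x == z) = false := by simp; omega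
      rw [pv_count_dropRun x z (by omega) ys, List.count_cons, hne]
      simp
    rw [hdropmap, ← ih hdx hdy]
    rw [show goSame (x :: xs) (x :: ys)
        = x * (1 + ((xs.takeWhile (fun z => decide (z = x))).length : Int))
            * (1 + ((ys.takeWhile (fun z => decide (z = x))).length : Int))
          + goSame (xs.dropWhile (fun z => decide (z = x))) (ys.dropWhile (fun z => decide (z = x)))
      from by rw [goSame]; simp]
    have hcx : (((x :: ys).count x : Int)) = ((ys.takeWhile (fun z => decide (z = x))).length : Int) + 1 := by
      rw [List.count_cons, hrun]
      simp
    rw [hcx]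
    ring

-- ===== VERDICT (by name: the statement is the Claim_ definition above) =====
theorem getSame_spec : Claim_equal_getSame := by
  intro l1 l2 _
  unfold Spec_getSame getSame_alt
  rw [pv_goSame_eq_sum _ _ (PySem.List.sorted_pairwise l1 (fun x => x) )
      (PySem.List.sorted_pairwise l2 (fun x => x)), pv_getSame_eq_sum]
  have hc : ∀ z : Int, (PySem.List.sorted l2 (fun x => x) false).count z = l2.count z :=
    fun z => (PySem.List.sorted_perm l2 (fun x => x) false).count_eq z
  have hmap : ((PySem.List.sorted l1 (fun x => x) false).map (fun x => x * ((PySem.List.sorted l2 (fun x => x) false).count x : Int))).Perm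
      (l1.map (fun x => x * (l2.count x : Int))) := by
    have := (PySem.List.sorted_perm l1 (fun x => x) false).map (fun x => x * (l2.count x : Int))
    simpa [hc] using this
  exact (hmap.sum_eq).symm
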